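-- pv_equiv track=rewrite | github.com/vladimir-demchenko/Python-mirea | task1.py | f13
-- ===== SOURCE A (Python) =====
-- def f13(n, m):
--     r1 = 0
--     r2 = 0
--     for i in range(1, n + 1):
--         for j in range(1, m + 1):
--             r1 += i ** 6 + 17 * j ** 2
--     for i in range(1, n + 1):
--         r2 += 58 * i ** 7 - 22 * i
--     return 62 * r1 - 98 * r2
-- ===== SOURCE B (Python) =====
-- def f13(n, m):
--     n = max(n, 0)
--     m = max(m, 0)
--     s1n = n * (n + 1) // 2
--     s2m = m * (m + 1) * (2 * m + 1) // 6
--     s6n = n * (n + 1) * (2 * n + 1) * (3 * n**4 + 6 * n**3 - 3 * n + 1) // 42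
--     s7n = n * n * (n + 1) * (n + 1) * (3 * n**4 + 6 * n**3 - n * n - 4 * n + 2) // 24
--     r1 = m * s6n + 17 * n * s2m
--     r2 = 58 * s7n - 22 * s1n
--     return 62 * r1 - 98 * r2
-- ===== Notes on version B (the rewrite author's own statement) =====
-- stated objective: faster
-- what changed: Replaced the nested O(n*m) summation loops with closed-form Faulhaber power-sum formulas (S1, S2, S6, S7) evaluated in O(1).
import Mathlib
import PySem

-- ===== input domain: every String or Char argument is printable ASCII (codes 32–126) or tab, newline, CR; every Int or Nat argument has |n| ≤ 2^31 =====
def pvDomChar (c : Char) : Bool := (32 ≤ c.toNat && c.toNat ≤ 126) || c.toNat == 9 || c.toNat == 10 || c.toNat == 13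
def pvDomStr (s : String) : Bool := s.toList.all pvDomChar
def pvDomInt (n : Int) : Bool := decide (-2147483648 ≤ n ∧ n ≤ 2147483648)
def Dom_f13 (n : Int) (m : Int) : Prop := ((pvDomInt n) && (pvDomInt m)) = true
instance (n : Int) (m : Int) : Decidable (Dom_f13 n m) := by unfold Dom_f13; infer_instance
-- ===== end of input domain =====

-- B replaces A's nested O(n*m) loops by closed-form Faulhaber power-sum formulas (O(1)).

-- ===== PORT A =====
def f13 (n : Int) (m : Int) : Int :=
  let r1 := (PySem.List.pyRange 1 (n + 1) 1).foldl
    (fun r1 i => (PySem.List.pyRange 1 (m + 1) 1).foldl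
      (fun r j => r + (i ^ 6 + 17 * j ^ 2)) r1) 0
  let r2 := (PySem.List.pyRange 1 (n + 1) 1).foldl
    (fun r i => r + (58 * i ^ 7 - 22 * i)) 0
  62 * r1 - 98 * r2

-- ===== PORT B =====
def f13_alt (n : Int) (m : Int) : Int :=
  let n := max n 0
  let m := max m 0
  let s1n := PySem.Int.floordiv (n * (n + 1)) 2
  let s2m := PySem.Int.floordiv (m * (m + 1) * (2 * m + 1)) 6
  let s6n := PySem.Int.floordiv (n * (n + 1) * (2 * n + 1) * (3 * n ^ 4 + 6 * n ^ 3 - 3 * n + 1)) 42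
  let s7n := PySem.Int.floordiv (n * n * (n + 1) * (n + 1) * (3 * n ^ 4 + 6 * n ^ 3 - n * n - 4 * n + 2)) 24
  let r1 := m * s6n + 17 * n * s2m
  let r2 := 58 * s7n - 22 * s1n
  62 * r1 - 98 * r2

-- ===== PRECONDITION & SPEC =====
def Spec_f13 (n : Int) (m : Int) (out : Int) : Prop := out = f13_alt n m
instance (n : Int) (m : Int) (out : Int) : Decidable (Spec_f13 n m out) := by unfold Spec_f13; infer_instance

-- ===== CLAIM (what is proved, stated in full; the proofs are below) =====
def Claim_equal_f13 : Prop := ∀ (n : Int) (m : Int), Dom_f13 n m → Spec_f13 n m (f13 n m)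

-- ===== LEMMAS AND PROOFS =====

/-- Sum of g(1) + ... + g(N). -/
def Tsum (g : Int → Int) : Nat → Int
  | 0 => 0
  | N + 1 => Tsum g N + g ((N : Int) + 1)

theorem foldl_range_add (g : Int → Int) (N : Nat) (c : Int) :
    (PySem.List.pyRange 1 ((N : Int) + 1) 1).foldl (fun r j => r + g j) c = c + Tsum g N := by
  induction N generalizing c with
  | zero =>
    rw [show ((0 : Nat) : Int) + 1 = 1 by norm_num, PySem.List.pyRange_one_eq_nil le_rfl]
    simp [Tsum]
  | succ k ih =>
    rw [show ((k + 1 : Nat) : Int) + 1 = ((k : Int) + 1) + 1 by push_cast; ring,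
        PySem.List.pyRange_one_succ_right (by omega), List.foldl_append]
    simp [ih, Tsum]; ring

theorem rangeClamp (n : Int) :
    PySem.List.pyRange 1 (n + 1) 1 = PySem.List.pyRange 1 (((max n 0).toNat : Int) + 1) 1 := by
  rcases le_total 0 n with h | h
  · rw [show (((max n 0).toNat : Int)) = n by omega]
  · rw [PySem.List.pyRange_one_eq_nil (by omega),
        PySem.List.pyRange_one_eq_nil (by omega)]

theorem Tsum_inner (i : Int) (M : Nat) :
    Tsum (fun j => i ^ 6 + 17 * j ^ 2) M = (M : Int) * i ^ 6 + 17 * Tsum (fun j => j ^ 2) M := by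
  induction M with
  | zero => simp [Tsum]
  | succ k ih => simp [Tsum, ih]; ring

theorem Tsum_outer (a c : Int) (N : Nat) :
    Tsum (fun i => a * i ^ 6 + c) N = a * Tsum (fun i => i ^ 6) N + (N : Int) * c := by
  induction N with
  | zero => simp [Tsum]
  | succ k ih => simp [Tsum, ih]; ring

theorem Tsum_r2 (N : Nat) :
    Tsum (fun i => 58 * i ^ 7 - 22 * i) N
      = 58 * Tsum (fun i => i ^ 7) N - 22 * Tsum (fun i => i) N := by
  induction N with
  | zero => simp [Tsum]
  | succ k ih => simp [Tsum, ih]; ring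

theorem C1 (N : Nat) : 2 * Tsum (fun i => i) N = (N : Int) * ((N : Int) + 1) := by
  induction N with
  | zero => simp [Tsum]
  | succ k ih => simp only [Tsum]; push_cast; push_cast at ih; linarith

theorem C2 (N : Nat) :
    6 * Tsum (fun i => i ^ 2) N = (N : Int) * ((N : Int) + 1) * (2 * (N : Int) + 1) := by
  induction N with
  | zero => simp [Tsum]
  | succ k ih => simp only [Tsum]; push_cast; push_cast at ih; nlinarith [ih]

theorem C6 (N : Nat) :
    42 * Tsum (fun i => i ^ 6) N
      = (N : Int) * ((N : Int) + 1) * (2 * (N : Int) + 1)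
        * (3 * (N : Int) ^ 4 + 6 * (N : Int) ^ 3 - 3 * (N : Int) + 1) := by
  induction N with
  | zero => simp [Tsum]
  | succ k ih => simp only [Tsum]; push_cast; push_cast at ih; nlinarith [ih]

theorem C7 (N : Nat) :
    24 * Tsum (fun i => i ^ 7) N
      = (N : Int) * (N : Int) * ((N : Int) + 1) * ((N : Int) + 1)
        * (3 * (N : Int) ^ 4 + 6 * (N : Int) ^ 3 - (N : Int) * (N : Int) - 4 * (N : Int) + 2) := by
  induction N with
  | zero => simp [Tsum]
  | succ k ih => simp only [Tsum]; push_cast; push_cast at ih; nlinarith [ih]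

theorem fd_exact (a t k : Int) (hk : 0 < k) (h : k * t = a) : PySem.Int.floordiv a k = t := by
  rw [PySem.Int.floordiv_eq_ediv_of_pos hk, ← h, Int.mul_ediv_cancel_left _ (by omega)]

-- ===== VERDICT (by name: the statement is the Claim_ definition above) =====
theorem f13_spec : Claim_equal_f13 := by
  intro n m _
  unfold Spec_f13 f13 f13_alt
  simp only [rangeClamp n, rangeClamp m, foldl_range_add, Tsum_inner, Tsum_outer, Tsum_r2]
  rw [show max n 0 = (((max n 0).toNat : Int)) from by omega,
      show max m 0 = (((max m 0).toNat : Int)) from by omega]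
  generalize (max n 0).toNat = N
  generalize (max m 0).toNat = M
  rw [fd_exact _ (Tsum (fun i => i) N) 2 (by omega) (C1 N),
      fd_exact _ (Tsum (fun j => j ^ 2) M) 6 (by omega) (C2 M),
      fd_exact _ (Tsum (fun i => i ^ 6) N) 42 (by omega) (C6 N),
      fd_exact _ (Tsum (fun i => i ^ 7) N) 24 (by omega) (C7 N)]
  simp only [Int.toNat_natCast]
  ring
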